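-- pv_equiv track=rewrite | github.com/Diego-Cruz-github/business-intelligence-dashboard | server_mvp.py | detectar_coluna_regiao
-- ===== SOURCE A (Python) =====
-- def detectar_coluna_regiao(dados):
--     """Detecta automaticamente a coluna de região/localização"""
--     for linha in dados:
--         for col in linha.keys():
--             col_lower = col.lower()
--             # Priorizar cidade_filial para vendas
--             if 'cidade_filial' in col_lower:
--                 return col
--         # Segunda passagem para outras colunas
--         for col in linha.keys():
--             col_lower = col.lower()
--             if any(palavra in col_lower for palavra in ['regiao', 'estado', 'cidade']):
--                 return col
--     return None
-- ===== SOURCE B (Python) =====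
-- def _score(cl):
--     """Priority score of a lowercased column name: 0 beats 1, 2 means no match."""
--     if 'cidade_filial' in cl:
--         return 0
--     if any(p in cl for p in ('regiao', 'estado', 'cidade')):
--         return 1
--     return 2
--
-- def detectar_coluna_regiao(dados):
--     """Detecta automaticamente a coluna de regiao/localizacao (score-and-min per row)"""
--     for linha in dados:
--         scored = [(_score(c.lower()), i, c) for i, c in enumerate(linha.keys())]
--         hits = [t for t in scored if t[0] < 2]
--         if hits:
--             return min(hits)[2]
--     return None
-- ===== Notes on version B (the rewrite author's own statement) =====
-- stated objective: alternative
-- what changed: Instead of A's two ordered passes over each row's keys, B scores every key once (0 for cidade_filial, 1 for a group word, 2 otherwise), filters the matches, and returns the key of the lexicographic minimum (score, position) triple.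
import Mathlib
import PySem

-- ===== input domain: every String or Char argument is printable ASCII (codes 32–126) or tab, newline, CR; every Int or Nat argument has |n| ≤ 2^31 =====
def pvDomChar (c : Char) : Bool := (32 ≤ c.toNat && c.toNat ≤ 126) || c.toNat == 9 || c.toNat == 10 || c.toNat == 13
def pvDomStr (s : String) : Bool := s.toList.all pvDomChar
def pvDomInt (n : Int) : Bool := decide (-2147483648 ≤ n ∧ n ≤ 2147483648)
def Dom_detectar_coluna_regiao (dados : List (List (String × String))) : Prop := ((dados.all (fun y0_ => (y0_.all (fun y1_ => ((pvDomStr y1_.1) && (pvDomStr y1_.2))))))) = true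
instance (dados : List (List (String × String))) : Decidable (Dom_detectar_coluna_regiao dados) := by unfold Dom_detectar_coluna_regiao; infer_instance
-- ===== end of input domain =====

-- B replaces A's two ordered passes per row by scoring every key and taking the minimal (score, position) triple (objective: alternative).

-- ===== PORT A =====
-- first pass over a row's keys: return the key whose lowercase contains 'cidade_filial'
def pvPass1 : List String → Option String
  | [] => none
  | col :: rest =>
      if PySem.Str.isIn "cidade_filial" (PySem.Str.lower col) then some col else pvPass1 rest

-- second pass: return the key whose lowercase contains any of the group words
def pvPass2 : List String → Option String
  | [] => none
  | col :: rest =>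
      if (["regiao", "estado", "cidade"].any fun palavra => PySem.Str.isIn palavra (PySem.Str.lower col))
      then some col else pvPass2 rest

def detectar_coluna_regiao (dados : List (List (String × String))) : Option String :=
  match dados with
  | [] => none
  | linha :: rest =>
      match pvPass1 (linha.map Prod.fst) with   -- linha.keys()
      | some col => some col
      | none =>
          match pvPass2 (linha.map Prod.fst) with
          | some col => some col
          | none => detectar_coluna_regiao rest

-- ===== PORT B =====
-- _score: priority score of a lowercased column name
def pvScore (cl : String) : Nat :=
  if PySem.Str.isIn "cidade_filial" cl then 0
  else if (["regiao", "estado", "cidade"].any fun p => PySem.Str.isIn p cl) then 1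
  else 2

-- Python's lexicographic '<' on the (score, index, key) triples
def pvLt3 (x y : Nat × Int × String) : Bool :=
  x.1 < y.1 || (x.1 == y.1 && (x.2.1 < y.2.1 || (x.2.1 == y.2.1 && x.2.2 < y.2.2)))

-- min(hits): leftmost minimal triple
def pvMin3 : List (Nat × Int × String) → Option (Nat × Int × String)
  | [] => none
  | t :: ts =>
      match pvMin3 ts with
      | none => some t
      | some m => some (if pvLt3 m t then m else t)

def detectar_coluna_regiao_alt (dados : List (List (String × String))) : Option String :=
  match dados with
  | [] => none
  | linha :: rest =>
      let scored := (PySem.List.enumerate (linha.map Prod.fst)).map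
        (fun ic => (pvScore (PySem.Str.lower ic.2), ic.1, ic.2))
      let hits := scored.filter (fun t => t.1 < 2)
      match pvMin3 hits with
      | some t => some t.2.2
      | none => detectar_coluna_regiao_alt rest

-- ===== PRECONDITION & SPEC =====
def Spec_detectar_coluna_regiao (dados : List (List (String × String))) (out : Option String) : Prop := out = detectar_coluna_regiao_alt dados
instance (dados : List (List (String × String))) (out : Option String) : Decidable (Spec_detectar_coluna_regiao dados out) := by unfold Spec_detectar_coluna_regiao; infer_instance

-- ===== CLAIM (what is proved, stated in full; the proofs are below) =====
def Claim_equal_detectar_coluna_regiao : Prop := ∀ (dados : List (List (String × String))), Dom_detectar_coluna_regiao dados → Spec_detectar_coluna_regiao dados (detectar_coluna_regiao dados)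

-- ===== LEMMAS AND PROOFS =====

-- B's per-row hit list, starting the enumeration at index n (proof-side reformulation)
def pvHits (n : Int) : List String → List (Nat × Int × String)
  | [] => []
  | c :: cs =>
      (if pvScore (PySem.Str.lower c) < 2 then [(pvScore (PySem.Str.lower c), n, c)] else [])
        ++ pvHits (n + 1) cs

lemma pvHits_eq (cols : List String) (n : Int) :
    ((PySem.List.enumerate cols n).map
        (fun ic => (pvScore (PySem.Str.lower ic.2), ic.1, ic.2))).filter (fun t => t.1 < 2)
      = pvHits n cols := by
  induction cols generalizing n with
  | nil => simp [pvHits, PySem.List.enumerate_nil]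
  | cons c cs ih =>
      simp only [PySem.List.enumerate_cons, List.map_cons, List.filter_cons, pvHits]
      split_ifs with h <;> simp_all

-- every hit carries an index ≥ n
lemma pvHits_idx_ge {t : Nat × Int × String} {cols : List String} {n : Int}
    (h : t ∈ pvHits n cols) : n ≤ t.2.1 := by
  induction cols generalizing n with
  | nil => simp [pvHits] at h
  | cons c cs ih =>
      simp only [pvHits, List.mem_append] at h
      rcases h with h | h
      · split_ifs at h <;> simp at h
        subst h; simp
      · have := ih h; omega

-- the minimum of a list is a member
lemma pvMin3_mem {t : Nat × Int × String} {l : List (Nat × Int × String)}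
    (h : pvMin3 l = some t) : t ∈ l := by
  induction l with
  | nil => simp [pvMin3] at h
  | cons x xs ih =>
      rw [pvMin3] at h
      cases hm : pvMin3 xs with
      | none => rw [hm] at h; simp at h; simp [h]
      | some m =>
          rw [hm] at h; simp at h
          by_cases hl : pvLt3 m x = true
          · simp [hl] at h; subst h; exact List.mem_cons_of_mem _ (ih hm)
          · simp [hl] at h; simp [h]

-- the characterisation: score and key of the row minimum = A's two passes
lemma pvMin3_hits_char (cols : List String) (n : Int) :
    (pvMin3 (pvHits n cols)).map (fun t => (t.1, t.2.2)) =
      match pvPass1 cols with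
      | some c => some (0, c)
      | none => (pvPass2 cols).map (fun c => (1, c)) := by
  induction cols generalizing n with
  | nil => simp [pvHits, pvMin3, pvPass1, pvPass2]
  | cons c cs ih =>
      have hidx : ∀ t ∈ pvHits (n + 1) cs, n + 1 ≤ t.2.1 := fun t ht => pvHits_idx_ge ht
      by_cases h1 : PySem.Str.isIn "cidade_filial" (PySem.Str.lower c) = true
      · -- score 0: the head wins against any later hit
        have hs : pvScore (PySem.Str.lower c) = 0 := by simp only [pvScore, h1, reduceIte]
        simp only [pvHits, hs, pvPass1, h1, if_true]
        simp only [show (0:Nat) < 2 by norm_num, if_true, List.singleton_append, pvMin3]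
        cases hm : pvMin3 (pvHits (n + 1) cs) with
        | none => simp
        | some m =>
            have hmem := pvMin3_mem hm
            have hge : n + 1 ≤ m.2.1 := hidx m hmem
            have : pvLt3 m (0, n, c) = false := by
              simp only [pvLt3, Bool.or_eq_false_iff, Bool.and_eq_false_iff,
                decide_eq_false_iff_not, beq_eq_false_iff_ne]
              exact ⟨by omega, Or.inr ⟨by omega, Or.inl (by omega)⟩⟩
            simp [this]
      · by_cases h2 : (["regiao", "estado", "cidade"].any
            fun p => PySem.Str.isIn p (PySem.Str.lower c)) = true
        · -- score 1: a later score-0 hit wins, otherwise the head wins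
          have hs : pvScore (PySem.Str.lower c) = 1 := by simp only [pvScore, h1, h2]; decide
          simp only [pvHits, hs, pvPass1, pvPass2, h1, h2, if_true]
          simp only [show (1:Nat) < 2 by norm_num, if_true, List.singleton_append, pvMin3]
          cases hm : pvMin3 (pvHits (n + 1) cs) with
          | none =>
              have := ih (n + 1)
              rw [hm] at this
              cases hp1 : pvPass1 cs with
              | some k => rw [hp1] at this; simp at this
              | none =>
                  rw [hp1] at this
                  cases hp2 : pvPass2 cs with
                  | some k => rw [hp2] at this; simp at this
                  | none => simp
          | some m =>
              have hmem := pvMin3_mem hm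
              have hge : n + 1 ≤ m.2.1 := hidx m hmem
              have hch := ih (n + 1); rw [hm] at hch
              cases hp1 : pvPass1 cs with
              | some k =>
                  -- tail minimum has score 0 and key k: it beats the head
                  rw [hp1] at hch; simp at hch
                  have hlt : pvLt3 m (1, n, c) = true := by
                    simp [pvLt3, hch.1]
                  simp [hlt, hch.1, hch.2]
              | none =>
                  rw [hp1] at hch
                  cases hp2 : pvPass2 cs with
                  | some k =>
                      -- tail minimum has score 1 but larger index: head wins
                      rw [hp2] at hch; simp at hch
                      have hlt : pvLt3 m (1, n, c) = false := by
                        simp only [pvLt3, Bool.or_eq_false_iff, Bool.and_eq_false_iff,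
                          decide_eq_false_iff_not, beq_eq_false_iff_ne]
                        exact ⟨by omega, Or.inr ⟨by omega, Or.inl (by omega)⟩⟩
                      simp [hlt]
                  | none => rw [hp2] at hch; simp at hch
        · -- score 2: the head is filtered out
          have hs : pvScore (PySem.Str.lower c) = 2 := by simp only [pvScore, h1, h2]; decide
          simp only [pvHits, hs, pvPass1, pvPass2, h1, h2]
          simpa using ih (n + 1)

lemma pv_main (dados : List (List (String × String))) :
    detectar_coluna_regiao dados = detectar_coluna_regiao_alt dados := by
  induction dados with
  | nil => rfl
  | cons linha rest ih =>
      simp only [detectar_coluna_regiao, detectar_coluna_regiao_alt, pvHits_eq]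
      have hch := pvMin3_hits_char (linha.map Prod.fst) 0
      cases hm : pvMin3 (pvHits 0 (linha.map Prod.fst)) with
      | none =>
          rw [hm] at hch
          cases hp1 : pvPass1 (linha.map Prod.fst) with
          | some k => rw [hp1] at hch; simp at hch
          | none =>
              rw [hp1] at hch
              cases hp2 : pvPass2 (linha.map Prod.fst) with
              | some k => rw [hp2] at hch; simp at hch
              | none => exact ih
      | some t =>
          rw [hm] at hch
          cases hp1 : pvPass1 (linha.map Prod.fst) with
          | some k => rw [hp1] at hch; simp at hch; simp [hch.2]
          | none =>
              rw [hp1] at hch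
              cases hp2 : pvPass2 (linha.map Prod.fst) with
              | some k => rw [hp2] at hch; simp at hch; simp [hch.2]
              | none => rw [hp2] at hch; simp at hch

-- ===== VERDICT (by name: the statement is the Claim_ definition above) =====
theorem detectar_coluna_regiao_spec : Claim_equal_detectar_coluna_regiao := by
  intro dados _
  exact pv_main dados
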